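-- pv_equiv track=rewrite | github.com/CvanderStoep/Project-Euler | solved_problems/problem62.py | permutation_stats
-- ===== SOURCE A (Python) =====
-- from collections import Counter, defaultdict
--
-- def canonical(n: int) -> str:
--     return ''.join(sorted(str(n)))
--
-- def permutation_stats(numbers: list):
--     counts = Counter()
--     groups = defaultdict(list)
--
--     for n in numbers:
--         key = canonical(n)
--         counts[key] += 1
--         groups[key].append(n)
--
--     return counts, groups
-- ===== SOURCE B (Python) =====
-- from collections import Counter, defaultdict
--
-- def permutation_stats(numbers: list):
--     keyed = [(''.join(sorted(str(n))), n) for n in numbers]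
--     seen = []
--     for k, _ in keyed:
--         if k not in seen:
--             seen.append(k)
--     counts = Counter()
--     groups = defaultdict(list)
--     for k in seen:
--         members = [n for kk, n in keyed if kk == k]
--         counts[k] = len(members)
--         groups[k] = members
--     return counts, groups
-- ===== Notes on version B (the rewrite author's own statement) =====
-- stated objective: alternative
-- what changed: A builds the Counter and the defaultdict simultaneously in one accumulation pass; B instead keys every number once, deduplicates the keys in first-occurrence order, and then materializes each group with one filter pass per distinct key, setting counts[k] = len(group).
import Mathlib
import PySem

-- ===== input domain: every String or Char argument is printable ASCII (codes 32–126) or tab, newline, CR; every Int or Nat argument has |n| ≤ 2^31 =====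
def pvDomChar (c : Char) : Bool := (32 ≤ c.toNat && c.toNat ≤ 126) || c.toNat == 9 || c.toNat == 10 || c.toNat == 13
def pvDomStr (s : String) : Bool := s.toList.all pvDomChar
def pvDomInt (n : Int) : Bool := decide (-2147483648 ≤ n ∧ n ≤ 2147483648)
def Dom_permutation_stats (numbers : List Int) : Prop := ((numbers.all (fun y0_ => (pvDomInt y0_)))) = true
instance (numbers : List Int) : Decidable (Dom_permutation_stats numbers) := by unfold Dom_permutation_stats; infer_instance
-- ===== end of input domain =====

-- B replaces A's single simultaneous-accumulation pass by: key every number, dedup the keys in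
-- first-occurrence order, then build each group by one filter pass per distinct key (objective: alternative).

-- ===== PORT A =====
-- canonical(n): ''.join(sorted(str(n)))
def canonicalA (n : Int) : String :=
  String.mk (PySem.List.sorted (PySem.Int.toChars n) (fun c => c) false)

def permutation_stats (numbers : List Int) : (List (String × Int)) × (List (String × List Int)) :=
  let r := numbers.foldl
    (fun (st : PySem.Dict String Int × PySem.Dict String (List Int)) n =>
      let key := canonicalA n
      (st.1.modify key 0 (· + 1), st.2.modify key [] (· ++ [n])))
    (PySem.Dict.empty, PySem.Dict.empty)
  (r.1.items, r.2.items)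

-- ===== PORT B =====
def permutation_stats_alt (numbers : List Int) : (List (String × Int)) × (List (String × List Int)) :=
  let keyed := numbers.map (fun n =>
    (String.mk (PySem.List.sorted (PySem.Int.toChars n) (fun c => c) false), n))
  let seen := keyed.foldl (fun s p => PySem.Set.add s p.1) ([] : PySem.Set String)
  let counts := seen.foldl
    (fun (d : PySem.Dict String Int) k =>
      d.insert k (((keyed.filter (fun (p : String × Int) => p.1 == k)).map (fun (p : String × Int) => p.2)).length : Int))
    PySem.Dict.empty
  let groups := seen.foldl
    (fun (d : PySem.Dict String (List Int)) k =>
      d.insert k ((keyed.filter (fun (p : String × Int) => p.1 == k)).map (fun (p : String × Int) => p.2)))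
    PySem.Dict.empty
  (counts.items, groups.items)

-- ===== PRECONDITION & SPEC =====
def Spec_permutation_stats (numbers : List Int) (out : (List (String × Int)) × (List (String × List Int))) : Prop := out = permutation_stats_alt numbers
instance (numbers : List Int) (out : (List (String × Int)) × (List (String × List Int))) : Decidable (Spec_permutation_stats numbers out) := by unfold Spec_permutation_stats; infer_instance

-- ===== CLAIM (what is proved, stated in full; the proofs are below) =====
def Claim_equal_permutation_stats : Prop := ∀ (numbers : List Int), Dom_permutation_stats numbers → Spec_permutation_stats numbers (permutation_stats numbers)

-- ===== LEMMAS AND PROOFS =====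

-- B's first loop computes exactly the ordered deduplication of the key list.
theorem pv_seen_eq (numbers : List Int) :
    (numbers.map (fun n => (canonicalA n, n))).foldl (fun (s : PySem.Set String) (p : String × Int) => PySem.Set.add s p.1)
      ([] : PySem.Set String)
    = PySem.Set.ofList (numbers.map canonicalA) := by
  rw [← PySem.Set.update_map_eq_foldl_add, List.map_map]
  exact PySem.Set.update_empty _

-- A's counts loop is Counter(map canonical numbers); its items list equals B's counts items list.
theorem pv_counts_eq (numbers : List Int) :
    (numbers.foldl (fun (d : PySem.Dict String Int) n => d.modify (canonicalA n) 0 (· + 1)) PySem.Dict.empty).items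
    = (((numbers.map (fun n => (canonicalA n, n))).foldl (fun (s : PySem.Set String) (p : String × Int) => PySem.Set.add s p.1)
        ([] : PySem.Set String)).foldl
        (fun (d : PySem.Dict String Int) k =>
          d.insert k ((((numbers.map (fun n => (canonicalA n, n))).filter
            (fun (p : String × Int) => p.1 == k)).map (fun (p : String × Int) => p.2)).length : Int))
        PySem.Dict.empty).items := by
  rw [pv_seen_eq]
  rw [PySem.Dict.items_foldl_insert_fresh _ (fun k => k) _ _
        (fun a _ => PySem.Dict.contains_empty a) (by rw [List.map_id']; exact PySem.Set.nodup_ofList _)]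
  rw [← List.foldl_map (f := canonicalA) (g := fun d k => PySem.Dict.modify d k 0 (· + 1)),
      ← PySem.Dict.counter_eq_foldl, PySem.Dict.items_counter,
      show (PySem.Dict.empty : PySem.Dict String Int).items = [] from rfl, List.nil_append]
  refine List.map_congr_left (fun k _ => ?_)
  congr 1
  rw [List.length_map]
  congr 1
  simp [List.count_eq_countP, List.countP_map, ← List.countP_eq_length_filter, Function.comp_def]

-- A's groups loop: items list equals B's groups items list.
theorem pv_groups_eq (numbers : List Int) :
    (numbers.foldl (fun (d : PySem.Dict String (List Int)) n => d.modify (canonicalA n) [] (· ++ [n])) PySem.Dict.empty).items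
    = (((numbers.map (fun n => (canonicalA n, n))).foldl (fun (s : PySem.Set String) (p : String × Int) => PySem.Set.add s p.1)
        ([] : PySem.Set String)).foldl
        (fun (d : PySem.Dict String (List Int)) k =>
          d.insert k (((numbers.map (fun n => (canonicalA n, n))).filter
            (fun (p : String × Int) => p.1 == k)).map (fun (p : String × Int) => p.2)))
        PySem.Dict.empty).items := by
  rw [pv_seen_eq]
  rw [PySem.Dict.items_foldl_insert_fresh _ (fun k => k) _ _
        (fun a _ => PySem.Dict.contains_empty a) (by rw [List.map_id']; exact PySem.Set.nodup_ofList _)]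
  have hfold : numbers.foldl (fun d n => PySem.Dict.modify d (canonicalA n) [] (· ++ [n]))
      PySem.Dict.empty
      = (numbers.map (fun n => (canonicalA n, n))).foldl
          (fun d p => PySem.Dict.modify d p.1 [] (· ++ [p.2])) PySem.Dict.empty := by
    rw [List.foldl_map]
  rw [hfold]
  have hkeys : ((numbers.map (fun n => (canonicalA n, n))).foldl
      (fun d p => PySem.Dict.modify d p.1 [] (· ++ [p.2])) PySem.Dict.empty).keys
      = PySem.Set.ofList (numbers.map canonicalA) := by
    rw [PySem.Dict.keys_foldl_modify_key (numbers.map (fun n => (canonicalA n, n)))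
          (fun p : String × Int => p.1) ([] : List Int) (fun _ p v => v ++ [p.2]) PySem.Dict.empty]
    simp only [List.map_map, Function.comp_def]
    exact PySem.Set.update_empty _
  have hnodup : ((numbers.map (fun n => (canonicalA n, n))).foldl
      (fun d p => PySem.Dict.modify d p.1 [] (· ++ [p.2])) PySem.Dict.empty).keys.Nodup := by
    exact PySem.Dict.nodup_keys_foldl_modify_key (numbers.map (fun n => (canonicalA n, n)))
      (fun p : String × Int => p.1) ([] : List Int) (fun _ p v => v ++ [p.2]) PySem.Dict.empty
      (by simp [PySem.Dict.keys_empty])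
  rw [PySem.Dict.items_eq_map_keys _ hnodup [], hkeys,
      show (PySem.Dict.empty : PySem.Dict String (List Int)).items = [] from rfl, List.nil_append]
  refine List.map_congr_left (fun k _ => ?_)
  congr 1
  exact (PySem.Dict.getD_foldl_modify_append _ _ _).trans (by simp)

-- ===== VERDICT (by name: the statement is the Claim_ definition above) =====
theorem permutation_stats_spec : Claim_equal_permutation_stats := by
  intro numbers _
  unfold Spec_permutation_stats permutation_stats permutation_stats_alt
  show (_, _) = (_, _)
  rw [PySem.List.foldl_prod_mk (f := fun d n => PySem.Dict.modify d (canonicalA n) 0 (· + 1))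
        (g := fun d n => PySem.Dict.modify d (canonicalA n) [] (· ++ [n]))]
  exact Prod.ext (pv_counts_eq numbers) (pv_groups_eq numbers)
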